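-- pv_equiv track=rewrite | github.com/AgustinDeLeonTorres/Phyton-C35-Class | Retos semana/modulos/m_retosemanal.py | eliminar_elementos_posteriores
-- ===== SOURCE A (Python) =====
-- def eliminar_elementos_posteriores(lista_actual, listas_posteriores):
--     """
--     Elimina de la lista actual los elementos que están en las listas posteriores
--
--     Args:
--         lista_actual: Lista de la que se eliminarán elementos
--         listas_posteriores: Lista de listas posteriores a comparar
--
--     Returns:
--         tuple: (lista_resultado, elementos_eliminados)
--     """
--     lista_resultado = lista_actual.copy()
--     elementos_eliminados = []
--
--     # Crear un conjunto con todos los elementos de las listas posteriores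
--     elementos_posteriores = set()
--     for lista in listas_posteriores:
--         elementos_posteriores.update(lista)
--
--     # Eliminar elementos que están en listas posteriores
--     for elemento in lista_actual:
--         if elemento in elementos_posteriores:
--             lista_resultado.remove(elemento)
--             elementos_eliminados.append(elemento)
--
--     return lista_resultado, elementos_eliminados
-- ===== SOURCE B (Python) =====
-- def eliminar_elementos_posteriores(lista_actual, listas_posteriores):
--     lista_resultado = [e for e in lista_actual
--                        if not any(e in l for l in listas_posteriores)]
--     elementos_eliminados = [e for e in lista_actual
--                             if any(e in l for l in listas_posteriores)]
--     return lista_resultado, elementos_eliminados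
-- ===== Notes on version B (the rewrite author's own statement) =====
-- stated objective: idiomatic
-- what changed: Replaced the union-set plus in-place list.remove loop by two order-preserving comprehensions that partition lista_actual, testing each element by scanning the later lists directly.
import Mathlib
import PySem

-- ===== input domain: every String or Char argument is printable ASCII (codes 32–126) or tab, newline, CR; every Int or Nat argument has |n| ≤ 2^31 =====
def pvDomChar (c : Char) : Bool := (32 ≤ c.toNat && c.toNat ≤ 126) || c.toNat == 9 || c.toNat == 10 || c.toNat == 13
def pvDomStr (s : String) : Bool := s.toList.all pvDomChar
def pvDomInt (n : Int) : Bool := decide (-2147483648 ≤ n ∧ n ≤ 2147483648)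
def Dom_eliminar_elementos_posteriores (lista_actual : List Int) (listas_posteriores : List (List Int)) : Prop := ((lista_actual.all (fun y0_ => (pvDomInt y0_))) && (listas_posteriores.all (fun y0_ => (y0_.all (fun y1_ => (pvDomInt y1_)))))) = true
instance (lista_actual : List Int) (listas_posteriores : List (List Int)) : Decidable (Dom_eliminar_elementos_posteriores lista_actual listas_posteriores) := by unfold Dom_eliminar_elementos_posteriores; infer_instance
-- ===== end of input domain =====

-- B replaces A's union-set + in-place list.remove loop by two order-preserving
-- comprehensions that partition lista_actual, testing membership by scanning the
-- later lists directly (objective: idiomatic; same return value).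

-- ===== PORT A =====
-- lista_resultado.remove(elemento): remove? never fails here (the element was
-- just seen in lista_actual and survives in lista_resultado); .getD keeps the
-- port total on the unreachable branch.
def eliminar_elementos_posteriores (lista_actual : List Int) (listas_posteriores : List (List Int)) : List Int × List Int :=
  let elementos_posteriores : PySem.Set Int :=
    listas_posteriores.foldl (fun s l => PySem.Set.update s l) PySem.Set.empty
  let st : List Int × List Int :=
    lista_actual.foldl
      (fun st elemento =>
        if PySem.Set.contains elementos_posteriores elemento then
          ((PySem.List.remove? st.1 elemento).getD st.1, st.2 ++ [elemento])
        else st)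
      (lista_actual, [])
  (st.1, st.2)

-- ===== PORT B =====
def eliminar_elementos_posteriores_alt (lista_actual : List Int) (listas_posteriores : List (List Int)) : List Int × List Int :=
  let lista_resultado := lista_actual.filter (fun e => !(listas_posteriores.any (fun l => l.contains e)))
  let elementos_eliminados := lista_actual.filter (fun e => listas_posteriores.any (fun l => l.contains e))
  (lista_resultado, elementos_eliminados)

-- ===== PRECONDITION & SPEC =====
def Spec_eliminar_elementos_posteriores (lista_actual : List Int) (listas_posteriores : List (List Int)) (out : List Int × List Int) : Prop := out = eliminar_elementos_posteriores_alt lista_actual listas_posteriores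
instance (lista_actual : List Int) (listas_posteriores : List (List Int)) (out : List Int × List Int) : Decidable (Spec_eliminar_elementos_posteriores lista_actual listas_posteriores out) := by unfold Spec_eliminar_elementos_posteriores; infer_instance

-- ===== CLAIM (what is proved, stated in full; the proofs are below) =====
def Claim_equal_eliminar_elementos_posteriores : Prop := ∀ (lista_actual : List Int) (listas_posteriores : List (List Int)), Dom_eliminar_elementos_posteriores lista_actual listas_posteriores → Spec_eliminar_elementos_posteriores lista_actual listas_posteriores (eliminar_elementos_posteriores lista_actual listas_posteriores)

-- ===== LEMMAS AND PROOFS =====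

-- The set built from all later lists contains exactly what a direct scan finds.
theorem pv_mem_fold_update (lps : List (List Int)) (s : PySem.Set Int) (x : Int) :
    x ∈ lps.foldl (fun s l => PySem.Set.update s l) s ↔ x ∈ s ∨ ∃ l ∈ lps, x ∈ l := by
  induction lps generalizing s with
  | nil => simp
  | cons l lps ih =>
    simp only [List.foldl_cons, ih, PySem.Set.mem_update, List.mem_cons]
    constructor
    · rintro ((h | h) | ⟨l', hl', hx⟩)
      · exact Or.inl h
      · exact Or.inr ⟨l, Or.inl rfl, h⟩
      · exact Or.inr ⟨l', Or.inr hl', hx⟩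
    · rintro (h | ⟨l', (rfl | hl'), hx⟩)
      · exact Or.inl (Or.inl h)
      · exact Or.inl (Or.inr hx)
      · exact Or.inr ⟨l', hl', hx⟩

theorem pv_contains_eq (lps : List (List Int)) (x : Int) :
    decide (x ∈ lps.foldl (fun s l => PySem.Set.update s l) ([] : List Int))
      = lps.any (fun l => decide (x ∈ l)) := by
  rw [Bool.eq_iff_iff]
  simp only [decide_eq_true_eq, List.any_eq_true]
  rw [pv_mem_fold_update]
  simp

-- Loop invariant for A's removal loop: the already-kept prefix contains no
-- element satisfying p, so each removal erases exactly the element being visited.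
theorem pv_loopA (p : Int → Bool) (rest pre elim : List Int)
    (hpre : ∀ a ∈ pre, p a = false) :
    rest.foldl
      (fun st e => if p e then ((PySem.List.remove? st.1 e).getD st.1, st.2 ++ [e]) else st)
      (pre ++ rest, elim)
      = (pre ++ rest.filter (fun e => !p e), elim ++ rest.filter p) := by
  induction rest generalizing pre elim with
  | nil => simp
  | cons e rest ih =>
    simp only [List.foldl_cons, List.filter_cons]
    by_cases hpe : p e = true
    · have hne : e ∉ pre := fun h => by simp [hpre e h] at hpe
      have hrem : PySem.List.remove? (pre ++ e :: rest) e = some (pre ++ rest) := by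
        rw [PySem.List.remove?_eq_some_erase (pre ++ e :: rest) e (by simp),
            List.erase_append_right _ hne, List.erase_cons_head]
      simp only [hpe, if_true, Bool.not_true, Bool.false_eq_true, if_false, hrem, Option.getD_some]
      simpa using ih pre (elim ++ [e]) hpre
    · have hpe' : p e = false := by simpa using hpe
      simp only [hpe', Bool.false_eq_true, if_false, Bool.not_false, if_true]
      have hpre' : ∀ a ∈ pre ++ [e], p a = false := by
        intro a ha
        rcases List.mem_append.mp ha with h | h
        · exact hpre a h
        · simp only [List.mem_singleton] at h; subst h; exact hpe'
      rw [show pre ++ e :: rest = (pre ++ [e]) ++ rest by simp, ih (pre ++ [e]) elim hpre']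
      simp

-- ===== VERDICT (by name: the statement is the Claim_ definition above) =====
theorem eliminar_elementos_posteriores_spec : Claim_equal_eliminar_elementos_posteriores := by
  intro la lps _
  show _ = _
  unfold eliminar_elementos_posteriores eliminar_elementos_posteriores_alt
  have h := pv_loopA
    (fun e => PySem.Set.contains (lps.foldl (fun s l => PySem.Set.update s l) PySem.Set.empty) e)
    la [] [] (by intro a h; simp at h)
  simp only [List.nil_append] at h
  simp only [h, Prod.mk.injEq]
  constructor <;>
    · apply List.filter_congr
      intro x _
      simp only [PySem.Set.contains, PySem.Set.empty, List.contains_eq_mem, pv_contains_eq]
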